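-- pv_equiv track=rewrite | github.com/1yash0804/Ai_twin | training_pipeline/unified_ingest.py | process_for_fine_tuning
-- ===== SOURCE A (Python) =====
-- YOUR_NAME_TAGS = ["yash:", "me:", "yash sharma:"]
--
-- AI_NAME_TAGS = ["assistant:", "ai:", "gpt:"]
--
-- def process_for_fine_tuning(raw_text):
--     """
--     Branch A: Extracts Dialogue for SQLite (Personality).
--     """
--     messages = []
--     lines = raw_text.split('\n')
--     current_role = None
--     buffer = []
--
--     for line in lines:
--         line = line.strip()
--         if not line: continue
--         line_lower = line.lower()
--
--         # Check for User
--         if any(line_lower.startswith(tag) for tag in YOUR_NAME_TAGS):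
--             if current_role and buffer: messages.append((current_role, " ".join(buffer)))
--             current_role = "user"
--             buffer = [line.split(":", 1)[1].strip() if ":" in line else line]
--
--         # Check for AI/Other
--         elif any(line_lower.startswith(tag) for tag in AI_NAME_TAGS):
--             if current_role and buffer: messages.append((current_role, " ".join(buffer)))
--             current_role = "assistant"
--             buffer = [line.split(":", 1)[1].strip() if ":" in line else line]
--
--         else:
--             if buffer: buffer.append(line)
--
--     if current_role and buffer: messages.append((current_role, " ".join(buffer)))
--     return messages
-- ===== SOURCE B (Python) =====
-- YOUR_NAME_TAGS = ["yash:", "me:", "yash sharma:"]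
--
-- AI_NAME_TAGS = ["assistant:", "ai:", "gpt:"]
--
--
-- def _role_of(line):
--     ll = line.lower()
--     if any(ll.startswith(t) for t in YOUR_NAME_TAGS):
--         return "user"
--     if any(ll.startswith(t) for t in AI_NAME_TAGS):
--         return "assistant"
--     return None
--
--
-- def process_for_fine_tuning(raw_text):
--     """
--     Segment-based rewrite: pre-clean the lines, locate tag lines, and emit one
--     message per tag line joined with its following continuation lines.
--     """
--     lines = [s for s in (l.strip() for l in raw_text.split('\n')) if s]
--     out = []
--     i = 0
--     n = len(lines)
--     # everything before the first tag line is dropped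
--     while i < n and _role_of(lines[i]) is None:
--         i += 1
--     while i < n:
--         head = lines[i]
--         j = i + 1
--         while j < n and _role_of(lines[j]) is None:
--             j += 1
--         content = head.split(':', 1)[1].strip() if ':' in head else head
--         out.append((_role_of(head), ' '.join([content] + lines[i + 1:j])))
--         i = j
--     return out
-- ===== Notes on version B (the rewrite author's own statement) =====
-- stated objective: alternative
-- what changed: Replaces A's single stateful flush-loop (current_role/buffer/inline flushes) with a two-phase segment scan: clean the lines once, then for each tag line take its run of continuation lines and emit the joined message directly.
import Mathlib
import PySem

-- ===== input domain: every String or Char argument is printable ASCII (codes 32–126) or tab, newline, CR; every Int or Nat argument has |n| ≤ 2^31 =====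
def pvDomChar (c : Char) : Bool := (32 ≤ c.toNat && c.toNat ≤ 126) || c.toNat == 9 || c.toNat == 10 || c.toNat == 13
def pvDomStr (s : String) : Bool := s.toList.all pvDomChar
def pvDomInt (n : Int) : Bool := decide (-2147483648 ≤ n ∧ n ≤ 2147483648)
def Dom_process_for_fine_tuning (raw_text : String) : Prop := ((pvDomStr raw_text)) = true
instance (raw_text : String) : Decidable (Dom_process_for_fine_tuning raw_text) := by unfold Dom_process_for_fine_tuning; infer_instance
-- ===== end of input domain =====

-- B replaces A's stateful flush-as-you-go loop by a segment scan (clean lines, then one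
-- message per tag line with its continuation run); alternative decomposition, same cost.


-- module constants (shared by both Pythons)
def pvUserTags : List String := ["yash:", "me:", "yash sharma:"]
def pvAiTags : List String := ["assistant:", "ai:", "gpt:"]

-- `line.split(":", 1)[1].strip() if ":" in line else line` (identical expression in A and B)
def pvContent (line : String) : String :=
  if PySem.Str.isIn ":" line then
    PySem.Str.strip (((PySem.Str.splitMax? line ":" 1).getD []).getD 1 "")
  else line

-- ===== PORT A =====
-- `if current_role and buffer: messages.append((current_role, " ".join(buffer)))`
def pvFlush (messages : List (String × String)) (cur : Option String) (buf : List String) :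
    List (String × String) :=
  match cur with
  | some r => if buf ≠ [] then messages ++ [(r, PySem.Str.join " " buf)] else messages
  | none => messages

-- one iteration of A's for-loop; state = (messages, current_role, buffer)
def pvStepA (st : List (String × String) × Option String × List String) (line0 : String) :
    List (String × String) × Option String × List String :=
  let line := PySem.Str.strip line0
  if line = "" then st
  else
    let line_lower := PySem.Str.lower line
    if pvUserTags.any (fun t => PySem.Str.startswith line_lower t) then
      (pvFlush st.1 st.2.1 st.2.2, some "user", [pvContent line])
    else if pvAiTags.any (fun t => PySem.Str.startswith line_lower t) then
      (pvFlush st.1 st.2.1 st.2.2, some "assistant", [pvContent line])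
    else
      (st.1, st.2.1, if st.2.2 ≠ [] then st.2.2 ++ [line] else st.2.2)

def process_for_fine_tuning (raw_text : String) : List (String × String) :=
  let st := ((PySem.Str.split? raw_text "\n").getD []).foldl pvStepA ([], none, [])
  pvFlush st.1 st.2.1 st.2.2

-- ===== PORT B =====
-- B's _role_of
def pvRoleOf (line : String) : Option String :=
  let ll := PySem.Str.lower line
  if pvUserTags.any (fun t => PySem.Str.startswith ll t) then some "user"
  else if pvAiTags.any (fun t => PySem.Str.startswith ll t) then some "assistant"
  else none

-- B's scan: skip non-tag lines before the first tag; at a tag line take the run of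
-- continuation lines (inner while loop) and emit one message, then continue after the run.
def pvCollectB : List String → List (String × String)
  | [] => []
  | l :: rest =>
    match pvRoleOf l with
    | none => pvCollectB rest
    | some r =>
      (r, PySem.Str.join " " (pvContent l :: rest.takeWhile (fun x => (pvRoleOf x).isNone))) ::
        pvCollectB (rest.dropWhile (fun x => (pvRoleOf x).isNone))
  termination_by ls => ls.length
  decreasing_by
    · simp
    · simpa using Nat.lt_succ_of_le (List.length_dropWhile_le _ _)

def process_for_fine_tuning_alt (raw_text : String) : List (String × String) :=
  pvCollectB ((((PySem.Str.split? raw_text "\n").getD []).map PySem.Str.strip).filter (fun s => s ≠ ""))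

-- ===== PRECONDITION & SPEC =====
def Spec_process_for_fine_tuning (raw_text : String) (out : List (String × String)) : Prop := out = process_for_fine_tuning_alt raw_text
instance (raw_text : String) (out : List (String × String)) : Decidable (Spec_process_for_fine_tuning raw_text out) := by unfold Spec_process_for_fine_tuning; infer_instance

-- ===== CLAIM (what is proved, stated in full; the proofs are below) =====
def Claim_equal_process_for_fine_tuning : Prop := ∀ (raw_text : String), Dom_process_for_fine_tuning raw_text → Spec_process_for_fine_tuning raw_text (process_for_fine_tuning raw_text)

-- ===== LEMMAS AND PROOFS =====

-- A's loop as a tail recursion over the remaining lines, final flush included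
def pvLoopA : List String → (List (String × String) × Option String × List String) → List (String × String)
  | [], st => pvFlush st.1 st.2.1 st.2.2
  | l :: rest, st => pvLoopA rest (pvStepA st l)

lemma pvLoopA_eq_foldl (ls : List String) (st : List (String × String) × Option String × List String) :
    pvLoopA ls st = pvFlush (ls.foldl pvStepA st).1 (ls.foldl pvStepA st).2.1 (ls.foldl pvStepA st).2.2 := by
  induction ls generalizing st with
  | nil => rfl
  | cons l rest ih => simp [pvLoopA, List.foldl, ih]

def pvClean (ls : List String) : List String :=
  (ls.map PySem.Str.strip).filter (fun s => s ≠ "")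

lemma pvCollectB_nil : pvCollectB [] = [] := by
  rw [pvCollectB.eq_def]

lemma pvCollectB_cons_none {l : String} {rest : List String} (h : pvRoleOf l = none) :
    pvCollectB (l :: rest) = pvCollectB rest := by
  rw [pvCollectB.eq_def]; simp [h]

lemma pvCollectB_cons_some {l : String} {rest : List String} {r : String}
    (h : pvRoleOf l = some r) :
    pvCollectB (l :: rest) =
      (r, PySem.Str.join " " (pvContent l :: rest.takeWhile (fun x => (pvRoleOf x).isNone))) ::
        pvCollectB (rest.dropWhile (fun x => (pvRoleOf x).isNone)) := by
  rw [pvCollectB.eq_def]; simp [h]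

lemma pvClean_cons_empty {l0 : String} {rest : List String} (h : PySem.Str.strip l0 = "") :
    pvClean (l0 :: rest) = pvClean rest := by
  simp [pvClean, h]

lemma pvClean_cons_nonempty {l0 : String} {rest : List String} (h : ¬ PySem.Str.strip l0 = "") :
    pvClean (l0 :: rest) = PySem.Str.strip l0 :: pvClean rest := by
  simp [pvClean, h]

lemma pvLoopA_some (ls : List String) :
    ∀ (msgs : List (String × String)) (r : String) (buf : List String), buf ≠ [] →
    pvLoopA ls (msgs, some r, buf) =
      msgs ++ (r, PySem.Str.join " " (buf ++ (pvClean ls).takeWhile (fun x => (pvRoleOf x).isNone))) ::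
        pvCollectB ((pvClean ls).dropWhile (fun x => (pvRoleOf x).isNone)) := by
  induction ls with
  | nil =>
    intro msgs r buf hb
    simp [pvLoopA, pvFlush, hb, pvClean, pvCollectB_nil]
  | cons l0 rest ih =>
    intro msgs r buf hb
    by_cases h0 : PySem.Str.strip l0 = ""
    · simp only [pvLoopA, pvStepA]
      rw [if_pos h0, pvClean_cons_empty h0]
      exact ih msgs r buf hb
    · rw [pvClean_cons_nonempty h0]
      by_cases hu : pvUserTags.any (fun t => PySem.Str.startswith (PySem.Str.lower (PySem.Str.strip l0)) t) = true
      · have hrole : pvRoleOf (PySem.Str.strip l0) = some "user" := by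
          unfold pvRoleOf; rw [if_pos hu]
        simp only [pvLoopA, pvStepA]
        rw [if_neg h0, if_pos hu]
        rw [ih (pvFlush msgs (some r) buf) "user" [pvContent (PySem.Str.strip l0)] (by simp)]
        simp [pvFlush, hb, hrole, pvCollectB_cons_some hrole]
      · by_cases ha : pvAiTags.any (fun t => PySem.Str.startswith (PySem.Str.lower (PySem.Str.strip l0)) t) = true
        · have hrole : pvRoleOf (PySem.Str.strip l0) = some "assistant" := by
            unfold pvRoleOf; rw [if_neg hu, if_pos ha]
          simp only [pvLoopA, pvStepA]
          rw [if_neg h0, if_neg hu, if_pos ha]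
          rw [ih (pvFlush msgs (some r) buf) "assistant" [pvContent (PySem.Str.strip l0)] (by simp)]
          simp [pvFlush, hb, hrole, pvCollectB_cons_some hrole]
        · have hrole : pvRoleOf (PySem.Str.strip l0) = none := by
            unfold pvRoleOf; rw [if_neg hu, if_neg ha]
          simp only [pvLoopA, pvStepA]
          rw [if_neg h0, if_neg hu, if_neg ha, if_pos hb]
          rw [ih msgs r (buf ++ [PySem.Str.strip l0]) (by simp)]
          simp [hrole]

lemma pvLoopA_none (ls : List String) :
    ∀ (msgs : List (String × String)),
    pvLoopA ls (msgs, none, []) = msgs ++ pvCollectB (pvClean ls) := by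
  induction ls with
  | nil => intro msgs; simp [pvLoopA, pvFlush, pvClean, pvCollectB_nil]
  | cons l0 rest ih =>
    intro msgs
    by_cases h0 : PySem.Str.strip l0 = ""
    · simp only [pvLoopA, pvStepA]
      rw [if_pos h0, pvClean_cons_empty h0]
      exact ih msgs
    · rw [pvClean_cons_nonempty h0]
      by_cases hu : pvUserTags.any (fun t => PySem.Str.startswith (PySem.Str.lower (PySem.Str.strip l0)) t) = true
      · have hrole : pvRoleOf (PySem.Str.strip l0) = some "user" := by
          unfold pvRoleOf; rw [if_pos hu]
        simp only [pvLoopA, pvStepA]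
        rw [if_neg h0, if_pos hu]
        rw [pvLoopA_some rest (pvFlush msgs none []) "user" [pvContent (PySem.Str.strip l0)] (by simp)]
        simp [pvFlush, pvCollectB_cons_some hrole]
      · by_cases ha : pvAiTags.any (fun t => PySem.Str.startswith (PySem.Str.lower (PySem.Str.strip l0)) t) = true
        · have hrole : pvRoleOf (PySem.Str.strip l0) = some "assistant" := by
            unfold pvRoleOf; rw [if_neg hu, if_pos ha]
          simp only [pvLoopA, pvStepA]
          rw [if_neg h0, if_neg hu, if_pos ha]
          rw [pvLoopA_some rest (pvFlush msgs none []) "assistant" [pvContent (PySem.Str.strip l0)] (by simp)]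
          simp [pvFlush, pvCollectB_cons_some hrole]
        · have hrole : pvRoleOf (PySem.Str.strip l0) = none := by
            unfold pvRoleOf; rw [if_neg hu, if_neg ha]
          simp only [pvLoopA, pvStepA]
          rw [if_neg h0, if_neg hu, if_neg ha]
          simp [ih msgs, pvCollectB_cons_none hrole]

-- ===== VERDICT (by name: the statement is the Claim_ definition above) =====
theorem process_for_fine_tuning_spec : Claim_equal_process_for_fine_tuning := by
  intro raw_text _
  unfold Spec_process_for_fine_tuning process_for_fine_tuning process_for_fine_tuning_alt
  rw [← pvLoopA_eq_foldl]
  simpa [pvClean] using pvLoopA_none ((PySem.Str.split? raw_text "\n").getD []) []
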